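-- pv_equiv track=rewrite | github.com/hectwilliams/AlgorithmBook | chapter9/python/chapter9.py | rising_squares
-- ===== SOURCE A (Python) =====
-- def rising_squares(num, string = ""):
--   data = str(pow(num, 2))
--
--   if num == 0:
--     return string
--
--   if num % 2 == 0:
--     string = " " + string + data + " "
--   else:
--     string = " " + data + string + " "
--   return rising_squares(num - 1, string)
-- ===== SOURCE B (Python) =====
-- def rising_squares(num, string = ""):
--     # Non-recursive: build the left and right halves of the space-layered
--     # result directly with joins, then wrap them around the seed string.
--     left = ''.join(' ' + (str(k * k) if k % 2 else '') for k in range(1, num + 1))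
--     right = ''.join((str(k * k) if k % 2 == 0 else '') + ' ' for k in range(num, 0, -1))
--     return left + string + right
-- ===== Notes on version B (the rewrite author's own statement) =====
-- stated objective: faster
-- what changed: Replaces A's accumulator recursion (which copies the whole growing string on every level) by a non-recursive closed construction: two ''.join range comprehensions build the left half (spaces plus odd squares ascending) and the right half (even squares descending plus spaces), wrapped once around the seed string.
import Mathlib
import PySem

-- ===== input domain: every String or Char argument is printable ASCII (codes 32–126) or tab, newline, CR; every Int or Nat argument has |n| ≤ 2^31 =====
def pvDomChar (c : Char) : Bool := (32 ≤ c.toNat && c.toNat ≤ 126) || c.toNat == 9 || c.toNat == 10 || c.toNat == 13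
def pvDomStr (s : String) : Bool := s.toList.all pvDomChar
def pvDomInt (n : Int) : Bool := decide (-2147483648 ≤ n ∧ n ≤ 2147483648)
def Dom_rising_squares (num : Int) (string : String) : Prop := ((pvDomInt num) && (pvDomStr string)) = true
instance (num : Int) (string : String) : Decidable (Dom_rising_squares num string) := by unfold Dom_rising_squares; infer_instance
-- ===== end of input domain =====

-- B replaces A's accumulator recursion by two direct range-joins (left and right
-- halves of the layered result) wrapped around the seed string; objective: faster (one pass over the output instead of re-copying the accumulator each level).

-- ===== PORT A =====
-- A's recursion, on List Char (String.append is kernel-opaque; String.ofList at the end).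
-- Guard 'num ≤ 0' only makes the recursion total: Python raises RecursionError for
-- num < 0 (excluded by Pre_) and returns `string` at num == 0 exactly as here.
def risingA (num : Int) (cs : List Char) : List Char :=
  let data := PySem.Int.toChars (num * num)
  if num ≤ 0 then cs
  else if PySem.Int.mod num 2 = 0 then risingA (num - 1) (' ' :: cs ++ data ++ [' '])
  else risingA (num - 1) (' ' :: data ++ cs ++ [' '])
termination_by num.toNat
decreasing_by all_goals omega

def rising_squares (num : Int) (string : String) : String :=
  String.ofList (risingA num string.toList)

-- ===== PORT B =====
-- transliteration of Source B: two ''.join over ranges (flatMap), then left + string + right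
def rising_squares_alt (num : Int) (string : String) : String :=
  let left := (PySem.List.pyRange 1 (num + 1) 1).flatMap (fun k =>
    ' ' :: (if PySem.Int.mod k 2 ≠ 0 then PySem.Int.toChars (k * k) else []))
  let right := (PySem.List.pyRange num 0 (-1)).flatMap (fun k =>
    (if PySem.Int.mod k 2 = 0 then PySem.Int.toChars (k * k) else []) ++ [' '])
  String.ofList (left ++ string.toList ++ right)

-- ===== PRECONDITION & SPEC =====
-- Pre_ excludes num < 0, on which Python A raises RecursionError (never returns).
def Pre_rising_squares (num : Int) (string : String) : Prop := 0 ≤ num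
instance (num : Int) (string : String) : Decidable (Pre_rising_squares num string) := by unfold Pre_rising_squares; infer_instance
def pvWitness_rising_squares : Int × String := (3, "hi")

def Spec_rising_squares (num : Int) (string : String) (out : String) : Prop := out = rising_squares_alt num string
instance (num : Int) (string : String) (out : String) : Decidable (Spec_rising_squares num string out) := by unfold Spec_rising_squares; infer_instance

-- ===== CLAIM (what is proved, stated in full; the proofs are below) =====
def Claim_equal_rising_squares : Prop := ∀ (num : Int) (string : String), Dom_rising_squares num string → Pre_rising_squares num string → Spec_rising_squares num string (rising_squares num string)

-- ===== LEMMAS AND PROOFS =====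

def pvL (n : Nat) : List Char :=
  (PySem.List.pyRange 1 ((n : Int) + 1) 1).flatMap (fun k =>
    ' ' :: (if PySem.Int.mod k 2 ≠ 0 then PySem.Int.toChars (k * k) else []))

def pvR (n : Nat) : List Char :=
  (PySem.List.pyRange (n : Int) 0 (-1)).flatMap (fun k =>
    (if PySem.Int.mod k 2 = 0 then PySem.Int.toChars (k * k) else []) ++ [' '])

lemma pvmod_eq (n : Nat) : PySem.Int.mod ((n : Int) + 1) 2 = (((n + 1) % 2 : Nat) : Int) := by
  have h := PySem.Int.mod_natCast (n + 1) 2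
  push_cast at h
  simpa using h

lemma pvL_succ (n : Nat) :
    pvL (n + 1)
      = pvL n ++ (' ' :: (if (n + 1) % 2 ≠ 0 then PySem.Int.toChars (((n : Int) + 1) * ((n : Int) + 1)) else [])) := by
  unfold pvL
  rw [PySem.List.pyRange_one, PySem.List.pyRange_one]
  push_cast
  rw [show ((n : Int) + 1 + 1 - 1).toNat = n + 1 by omega,
      show ((n : Int) + 1 - 1).toNat = n by omega,
      List.range_succ, List.map_append, List.flatMap_append]
  simp only [List.map_cons, List.map_nil, List.flatMap_cons, List.flatMap_nil, List.append_nil]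
  rw [show (1 : Int) + (n : Int) = ((n : Int) + 1) by ring]
  by_cases hp : (n + 1) % 2 = 0
  · have hm0 : PySem.Int.mod ((n : Int) + 1) 2 = 0 := by rw [pvmod_eq]; exact_mod_cast hp
    rw [hm0]; simp [hp]
  · have hm1 : PySem.Int.mod ((n : Int) + 1) 2 = 1 := by
      rw [pvmod_eq]; exact_mod_cast (show (n + 1) % 2 = 1 by omega)
    rw [hm1]; simp [hp]

lemma pvR_succ (n : Nat) :
    pvR (n + 1)
      = ((if (n + 1) % 2 = 0 then PySem.Int.toChars (((n : Int) + 1) * ((n : Int) + 1)) else []) ++ [' ']) ++ pvR n := by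
  unfold pvR
  have hrange : PySem.List.pyRange ((n : Int) + 1) 0 (-1)
      = ((n : Int) + 1) :: PySem.List.pyRange (n : Int) 0 (-1) := by
    simp only [PySem.List.pyRange]
    norm_num
    rw [show (if 0 < n then n else 0) = n by rcases Nat.eq_zero_or_pos n with h | h <;> simp [h],
        List.range_succ_eq_map]
    simp only [List.map_cons, List.map_map, Nat.cast_zero, neg_zero, add_zero]
    refine List.cons_eq_cons.mpr ⟨rfl, ?_⟩
    apply List.map_congr_left
    intro k _
    simp only [Function.comp]
    push_cast
    ring
  rw [show ((n + 1 : Nat) : Int) = (n : Int) + 1 by push_cast; ring] at *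
  rw [hrange, List.flatMap_cons]
  by_cases hp : (n + 1) % 2 = 0
  · have hm0 : PySem.Int.mod ((n : Int) + 1) 2 = 0 := by rw [pvmod_eq]; exact_mod_cast hp
    rw [hm0]; simp [hp]
  · have hm1 : PySem.Int.mod ((n : Int) + 1) 2 = 1 := by
      rw [pvmod_eq]; exact_mod_cast (show (n + 1) % 2 = 1 by omega)
    rw [hm1]; simp [hp]

lemma risingA_eq (n : Nat) : ∀ cs : List Char, risingA (n : Int) cs = pvL n ++ cs ++ pvR n := by
  induction n with
  | zero => intro cs; rw [risingA]; simp [pvL, pvR, PySem.List.pyRange]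
  | succ n ih =>
      intro cs
      rw [risingA]
      rw [show ((n + 1 : Nat) : Int) = (n : Int) + 1 by push_cast; ring]
      have hpos : ¬ ((n : Int) + 1) ≤ 0 := by omega
      simp only [hpos, if_false]
      rw [show ((n : Int) + 1 - 1) = (n : Int) by ring]
      by_cases hp : (n + 1) % 2 = 0
      · have hm0 : PySem.Int.mod ((n : Int) + 1) 2 = 0 := by rw [pvmod_eq]; exact_mod_cast hp
        rw [hm0, if_pos rfl, ih, pvL_succ, pvR_succ]
        simp [hp, List.append_assoc]
      · have hm1 : PySem.Int.mod ((n : Int) + 1) 2 = 1 := by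
          rw [pvmod_eq]; exact_mod_cast (show (n + 1) % 2 = 1 by omega)
        rw [hm1, if_neg (by decide), ih, pvL_succ, pvR_succ]
        simp [hp, List.append_assoc]

-- ===== VERDICT (by name: the statement is the Claim_ definition above) =====
theorem rising_squares_spec : Claim_equal_rising_squares := by
  intro num s _ hpre
  unfold Spec_rising_squares rising_squares rising_squares_alt
  have hnum : num = ((num.toNat : Nat) : Int) := (Int.toNat_of_nonneg hpre).symm
  rw [hnum, risingA_eq]
  rfl
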